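-- pv_equiv track=rewrite | github.com/chiralcentre/Kattis | diversecontest.py | check_suitability
-- ===== SOURCE A (Python) =====
-- def check_suitability(comb, problems, k):
--     contest_topics = {}
--     for idx in comb:
--         topics = problems[idx]
--         for t in topics:
--             contest_topics[t] = contest_topics.get(t, 0) + 1
--             if contest_topics[t] > (k >> 1):
--                 return 0
--     return 1
-- ===== SOURCE B (Python) =====
-- def check_suitability(comb, problems, k):
--     half = k >> 1
--     tokens = sorted(t for idx in comb for t in problems[idx])
--     i, n = 0, len(tokens)
--     while i < n:
--         j = i + 1
--         while j < n and tokens[j] == tokens[i]: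
--             j += 1
--         if j - i > half:
--             return 0
--         i = j
--     return 1
-- ===== Notes on version B (the rewrite author's own statement) =====
-- stated objective: alternative
-- what changed: A threads a counting dict through nested loops, checking the k>>1 threshold after every increment; B uses no counting at all: it sorts the flattened topic list, so equal topics become adjacent, and then scans maximal runs of equal neighbours, failing when a run is longer than k>>1.
-- outside the precondition, e.g. on check_suitability([0, 5], {0: ['a', 'a', 'a']}, 2): A returns 0, B raises KeyError
import Mathlib
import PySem

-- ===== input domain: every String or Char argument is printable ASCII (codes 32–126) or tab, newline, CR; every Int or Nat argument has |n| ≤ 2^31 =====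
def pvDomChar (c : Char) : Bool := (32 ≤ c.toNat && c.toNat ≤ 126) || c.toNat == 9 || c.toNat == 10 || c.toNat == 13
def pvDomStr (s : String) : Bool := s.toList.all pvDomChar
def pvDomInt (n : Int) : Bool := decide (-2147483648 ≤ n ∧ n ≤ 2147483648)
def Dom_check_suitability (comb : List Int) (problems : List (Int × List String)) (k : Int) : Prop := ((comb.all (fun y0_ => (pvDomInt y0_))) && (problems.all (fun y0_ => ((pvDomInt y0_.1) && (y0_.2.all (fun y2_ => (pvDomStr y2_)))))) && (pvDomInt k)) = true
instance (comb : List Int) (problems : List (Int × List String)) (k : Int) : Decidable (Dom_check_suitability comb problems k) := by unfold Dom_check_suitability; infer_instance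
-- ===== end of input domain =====

-- B replaces A's dict-counting loop with in-loop threshold check by sort-then-run-scan:
-- sort the flattened topic list and fail when a maximal run of equal neighbours exceeds k>>1.

-- ===== PORT A =====
-- inner `for t in topics` loop: counts into contest_topics; `none` = the early `return 0`
def pvInnerA (half : Int) : PySem.Dict String Int → List String → Option (PySem.Dict String Int)
  | d, [] => some d
  | d, t :: ts =>
    let d' := d.insert t (d.getD t 0 + 1)    -- contest_topics[t] = contest_topics.get(t, 0) + 1
    if d'.getD t 0 > half then none          -- if contest_topics[t] > (k >> 1): return 0
    else pvInnerA half d' ts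

-- outer `for idx in comb` loop
def pvLoopA (half : Int) (pd : PySem.Dict Int (List String)) : PySem.Dict String Int → List Int → Int
  | _, [] => 1
  | d, idx :: rest =>
    match pd.get? idx with
    | none => 0                              -- problems[idx]: KeyError (outside Pre_)
    | some topics =>
      match pvInnerA half d topics with
      | none => 0
      | some d' => pvLoopA half pd d' rest

def check_suitability (comb : List Int) (problems : List (Int × List String)) (k : Int) : Int :=
  -- the Python parameter `problems` is a dict: materialise the association list as one
  pvLoopA (k >>> (1 : Nat)) (PySem.Dict.ofList problems) PySem.Dict.empty comb

-- ===== PORT B =====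
-- Source B's while-loop over the sorted list: each iteration isolates the maximal run
-- starting at i (inner `while tokens[j] == tokens[i]` = takeWhile), compares its length
-- with half, and continues at the first element past the run (i = j = dropWhile).
def pvGroupScanB (half : Int) : List String → Int
  | [] => 1
  | t :: ts =>
    let run : Int := 1 + (ts.takeWhile (fun x => x == t)).length
    if run > half then 0
    else pvGroupScanB half (ts.dropWhile (fun x => x == t))
termination_by L => L.length
decreasing_by
  simpa using Nat.lt_succ_of_le (List.length_dropWhile_le (fun x => x == t) ts)

def check_suitability_alt (comb : List Int) (problems : List (Int × List String)) (k : Int) : Int :=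
  let pd := PySem.Dict.ofList problems       -- the Python parameter `problems` is a dict
  let half := k >>> (1 : Nat)
  -- tokens = sorted(t for idx in comb for t in problems[idx])   (KeyError outside Pre_)
  let tokens := PySem.List.sorted (comb.flatMap (fun idx => (pd.get? idx).getD [])) (fun x => x) false
  pvGroupScanB half tokens

-- ===== PRECONDITION & SPEC =====
-- Pre_ = every selected index is a key of problems. A looks keys up one by one and can
-- return 0 at the threshold before ever reaching a later missing key, while B (and A on
-- any earlier position) raises KeyError there: combs with a missing key are excluded.
def Pre_check_suitability (comb : List Int) (problems : List (Int × List String)) (k : Int) : Prop :=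
  ∀ idx ∈ comb, (PySem.Dict.ofList problems).contains idx = true
instance (comb : List Int) (problems : List (Int × List String)) (k : Int) : Decidable (Pre_check_suitability comb problems k) := by unfold Pre_check_suitability; infer_instance

def pvWitness_check_suitability : List Int × (List (Int × List String)) × Int :=
  ([0, 1, 0], [(0, ["dp", "graphs"]), (1, ["math", "dp"])], 6)

def Spec_check_suitability (comb : List Int) (problems : List (Int × List String)) (k : Int) (out : Int) : Prop := out = check_suitability_alt comb problems k
instance (comb : List Int) (problems : List (Int × List String)) (k : Int) (out : Int) : Decidable (Spec_check_suitability comb problems k out) := by unfold Spec_check_suitability; infer_instance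

-- ===== CLAIM (what is proved, stated in full; the proofs are below) =====
def Claim_equal_check_suitability : Prop := ∀ (comb : List Int) (problems : List (Int × List String)) (k : Int), Dom_check_suitability comb problems k → Pre_check_suitability comb problems k → Spec_check_suitability comb problems k (check_suitability comb problems k)

-- ===== LEMMAS AND PROOFS =====

-- A's inner loop, characterised: it early-exits iff some topic's running total would pass
-- the threshold — equivalently (counts only grow) iff its final total passes it — and
-- otherwise ends in the plain counting fold of the topic list.
lemma pvInnerA_eq (half : Int) (L : List String) : ∀ d : PySem.Dict String Int,
    pvInnerA half d L =
      if ∃ t ∈ L, d.getD t 0 + (L.count t : Int) > half then none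
      else some (L.foldl (fun d t => d.insert t (d.getD t 0 + 1)) d) := by
  induction L with
  | nil => intro d; simp [pvInnerA]
  | cons t ts ih =>
    intro d
    simp only [pvInnerA, PySem.Dict.getD_insert_self]
    by_cases hc : d.getD t 0 + 1 > half
    · rw [if_pos hc, if_pos]
      exact ⟨t, List.mem_cons_self, by
        have : (1 : Int) ≤ ((t :: ts).count t : Int) := by
          have h1 : List.count t (t :: ts) = List.count t ts + 1 := List.count_cons_self
          push_cast [h1]; omega
        omega⟩
    · rw [if_neg hc, ih]
      have hiff : (∃ s ∈ ts, (d.insert t (d.getD t 0 + 1)).getD s 0 + (ts.count s : Int) > half)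
          ↔ (∃ s ∈ t :: ts, d.getD s 0 + ((t :: ts).count s : Int) > half) := by
        constructor
        · rintro ⟨s, hs, hv⟩
          refine ⟨s, List.mem_cons_of_mem _ hs, ?_⟩
          rw [PySem.Dict.getD_insert] at hv
          by_cases hst : s = t
          · subst hst
            have h1 : List.count s (s :: ts) = List.count s ts + 1 := List.count_cons_self
            rw [if_pos rfl] at hv
            push_cast [h1]; omega
          · rw [if_neg hst] at hv
            have h1 : List.count s (t :: ts) = List.count s ts := List.count_cons_of_ne (fun h => hst h.symm)
            rw [h1]; exact hv
        · rintro ⟨s, hs, hv⟩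
          rcases List.mem_cons.mp hs with rfl | hsts
          · by_cases hmem : s ∈ ts
            · refine ⟨s, hmem, ?_⟩
              rw [PySem.Dict.getD_insert, if_pos rfl]
              have h1 : List.count s (s :: ts) = List.count s ts + 1 := List.count_cons_self
              push_cast [h1] at hv; omega
            · exfalso
              have h0 : ts.count s = 0 := List.count_eq_zero.mpr hmem
              have h1 : List.count s (s :: ts) = List.count s ts + 1 := List.count_cons_self
              rw [h1, h0] at hv
              push_cast at hv; omega
          · refine ⟨s, hsts, ?_⟩
            rw [PySem.Dict.getD_insert]
            by_cases hst : s = t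
            · subst hst
              have h1 : List.count s (s :: ts) = List.count s ts + 1 := List.count_cons_self
              rw [if_pos rfl]
              push_cast [h1] at hv; omega
            · rw [if_neg hst]
              have h1 : List.count s (t :: ts) = List.count s ts := List.count_cons_of_ne (fun h => hst h.symm)
              rw [h1] at hv; exact hv
      rw [if_congr hiff rfl rfl]
      rfl

-- A's whole loop, characterised over the flattened token list
lemma pvLoopA_eq (half : Int) (pd : PySem.Dict Int (List String)) :
    ∀ (comb : List Int) (d : PySem.Dict String Int),
    (∀ idx ∈ comb, pd.contains idx = true) →
    pvLoopA half pd d comb =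
      if ∃ t ∈ comb.flatMap (fun idx => (pd.get? idx).getD []),
          d.getD t 0 + ((comb.flatMap (fun idx => (pd.get? idx).getD [])).count t : Int) > half
      then 0 else 1 := by
  intro comb
  induction comb with
  | nil => intro d _; simp [pvLoopA]
  | cons idx rest ih =>
    intro d hkeys
    obtain ⟨ts, hts⟩ : ∃ ts, pd.get? idx = some ts := by
      have h := hkeys idx List.mem_cons_self
      rw [PySem.Dict.contains_eq_isSome_get?] at h
      rcases hh : pd.get? idx with _ | ts
      · rw [hh] at h; simp at h
      · exact ⟨ts, rfl⟩
    have hflat : (idx :: rest).flatMap (fun i => (pd.get? i).getD []) =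
        ts ++ rest.flatMap (fun i => (pd.get? i).getD []) := by
      simp [List.flatMap_cons, hts]
    simp only [pvLoopA, hts, hflat]
    set T2 := rest.flatMap (fun i => (pd.get? i).getD []) with hT2
    have hI := pvInnerA_eq half ts d
    by_cases hC1 : ∃ t ∈ ts, d.getD t 0 + (ts.count t : Int) > half
    · rw [if_pos hC1] at hI
      rw [hI]
      show (0 : Int) = _
      rw [if_pos]
      obtain ⟨t, ht, hv⟩ := hC1
      refine ⟨t, List.mem_append_left _ ht, ?_⟩
      have h1 : List.count t (ts ++ T2) = List.count t ts + List.count t T2 := List.count_append ..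
      push_cast [h1]; omega
    · rw [if_neg hC1] at hI
      rw [hI]
      show pvLoopA half pd (ts.foldl (fun d t => d.insert t (d.getD t 0 + 1)) d) rest = _
      rw [ih _ (fun i hi => hkeys i (List.mem_cons_of_mem _ hi))]
      have hiff : (∃ t ∈ T2,
            (ts.foldl (fun d t => d.insert t (d.getD t 0 + 1)) d).getD t 0 + (T2.count t : Int) > half)
          ↔ (∃ t ∈ ts ++ T2, d.getD t 0 + ((ts ++ T2).count t : Int) > half) := by
        constructor
        · rintro ⟨t, ht, hv⟩
          refine ⟨t, List.mem_append_right _ ht, ?_⟩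
          rw [PySem.Dict.getD_foldl_insert_add_one] at hv
          have h1 : List.count t (ts ++ T2) = List.count t ts + List.count t T2 := List.count_append ..
          push_cast [h1]; omega
        · rintro ⟨t, ht, hv⟩
          have hcnt : List.count t (ts ++ T2) = List.count t ts + List.count t T2 := List.count_append ..
          by_cases htT2 : t ∈ T2
          · refine ⟨t, htT2, ?_⟩
            rw [PySem.Dict.getD_foldl_insert_add_one]
            push_cast [hcnt] at hv; omega
          · exfalso
            have hts' : t ∈ ts := by
              rcases List.mem_append.mp ht with h | h
              · exact h
              · exact absurd h htT2
            have h0 : T2.count t = 0 := List.count_eq_zero.mpr htT2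
            rw [hcnt, h0] at hv
            push_cast at hv
            exact hC1 ⟨t, hts', by omega⟩
      rw [if_congr hiff rfl rfl]

-- in a ≤-sorted list whose elements all dominate t, the part after the leading
-- run of t's contains no t at all (equal elements are contiguous)
lemma pv_drop_ne (t : String) : ∀ (ts : List String), ts.Pairwise (· ≤ ·) →
    (∀ x ∈ ts, t ≤ x) → ∀ x ∈ ts.dropWhile (fun y => y == t), x ≠ t := by
  intro ts
  induction ts with
  | nil => intro _ _ x hx; simp [List.dropWhile] at hx
  | cons a as ih =>
    intro hp hge x hx
    by_cases hat : a = t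
    · subst hat
      rw [List.dropWhile_cons_of_pos (by simp)] at hx
      exact ih (List.Pairwise.of_cons hp) (fun y hy => hge y (List.mem_cons_of_mem _ hy)) x hx
    · rw [List.dropWhile_cons_of_neg (by simp [hat])] at hx
      have hta : t < a := lt_of_le_of_ne (hge a List.mem_cons_self) (fun h => hat h.symm)
      rcases List.mem_cons.mp hx with rfl | hxas
      · exact fun h => hat h
      · have hax : a ≤ x := (List.pairwise_cons.mp hp).1 x hxas
        exact fun h => absurd (h ▸ hax) (not_le_of_gt hta)

-- the leading-run count bookkeeping shared by both branches of the scan lemma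
lemma pv_run_counts (t : String) (ts : List String) (hp : (t :: ts).Pairwise (· ≤ ·)) :
    ((t :: ts).count t : Int) = 1 + ((ts.takeWhile (fun y => y == t)).length : Int)
    ∧ ∀ u, u ≠ t →
      ((t :: ts).count u : Int) = ((ts.dropWhile (fun y => y == t)).count u : Int) := by
  have hge : ∀ x ∈ ts, t ≤ x := (List.pairwise_cons.mp hp).1
  have hdec : ts = ts.takeWhile (fun y => y == t) ++ ts.dropWhile (fun y => y == t) :=
    (List.takeWhile_append_dropWhile).symm
  have htake : ∀ x ∈ ts.takeWhile (fun y => y == t), x = t := by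
    intro x hx
    have := List.mem_takeWhile_imp hx
    simpa using this
  have hdropne := pv_drop_ne t ts (List.Pairwise.of_cons hp) hge
  constructor
  · have h1 : (t :: ts).count t = ts.count t + 1 := List.count_cons_self
    have h2 : ts.count t = (ts.takeWhile (fun y => y == t)).count t
        + (ts.dropWhile (fun y => y == t)).count t := by
      conv_lhs => rw [hdec]
      exact List.count_append ..
    have h3 : (ts.takeWhile (fun y => y == t)).count t
        = (ts.takeWhile (fun y => y == t)).length := by
      apply List.count_eq_length.mpr
      intro x hx; exact (htake x hx).symm
    have h4 : (ts.dropWhile (fun y => y == t)).count t = 0 :=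
      List.count_eq_zero.mpr (fun h => hdropne t h rfl)
    rw [h1, h2, h3, h4]; push_cast; ring
  · intro u hu
    have h1 : (t :: ts).count u = ts.count u := List.count_cons_of_ne (fun h => hu h.symm)
    have h2 : ts.count u = (ts.takeWhile (fun y => y == t)).count u
        + (ts.dropWhile (fun y => y == t)).count u := by
      conv_lhs => rw [hdec]
      exact List.count_append ..
    have h3 : (ts.takeWhile (fun y => y == t)).count u = 0 :=
      List.count_eq_zero.mpr (fun h => hu (htake u h))
    rw [h1, h2, h3]; push_cast; ring

-- B's run scan on a sorted list decides exactly "some element occurs more than half times"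
lemma pvGroupScanB_sorted_aux (half : Int) : ∀ (n : Nat) (L : List String), L.length ≤ n →
    L.Pairwise (· ≤ ·) →
    pvGroupScanB half L = if ∃ u ∈ L, (L.count u : Int) > half then 0 else 1 := by
  intro n
  induction n with
  | zero =>
    intro L hlen _
    have : L = [] := List.eq_nil_of_length_eq_zero (Nat.le_zero.mp hlen)
    subst this; simp [pvGroupScanB]
  | succ n ih0 =>
    intro L hlen hp
    match L with
    | [] => simp [pvGroupScanB]
    | t :: ts =>
    obtain ⟨hct, hcne⟩ := pv_run_counts t ts hp
    have hlen' : (ts.dropWhile (fun y => y == t)).length ≤ n :=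
      le_trans (List.length_dropWhile_le _ _) (Nat.lt_succ_iff.mp hlen)
    by_cases hrun : (1 + ((ts.takeWhile (fun y => y == t)).length : Int)) > half
    · have hunf : pvGroupScanB half (t :: ts)
          = if (1 + ((ts.takeWhile (fun y => y == t)).length : Int)) > half then 0
            else pvGroupScanB half (ts.dropWhile (fun y => y == t)) := by
        rw [pvGroupScanB]
      rw [hunf, if_pos hrun, if_pos]
      exact ⟨t, List.mem_cons_self, by rw [hct]; exact hrun⟩
    ·
      have hunf : pvGroupScanB half (t :: ts)
          = if (1 + ((ts.takeWhile (fun y => y == t)).length : Int)) > half then 0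
            else pvGroupScanB half (ts.dropWhile (fun y => y == t)) := by
        rw [pvGroupScanB]
      have hdec : ts = ts.takeWhile (fun y => y == t) ++ ts.dropWhile (fun y => y == t) :=
        (List.takeWhile_append_dropWhile).symm
      have htake : ∀ x ∈ ts.takeWhile (fun y => y == t), x = t := by
        intro x hx
        have := List.mem_takeWhile_imp hx
        simpa using this
      have hdropne := pv_drop_ne t ts (List.Pairwise.of_cons hp) (List.pairwise_cons.mp hp).1
      rw [hunf, if_neg hrun]
      have hrest_sorted : (ts.dropWhile (fun y => y == t)).Pairwise (· ≤ ·) :=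
        (List.Pairwise.of_cons hp).sublist (List.dropWhile_sublist _)
      rw [ih0 _ hlen' hrest_sorted]
      congr 1
      apply propext
      constructor
      · rintro ⟨u, hu, hv⟩
        have hut : u ≠ t := hdropne u hu
        refine ⟨u, ?_, ?_⟩
        · exact List.mem_cons_of_mem _
            ((List.dropWhile_sublist (l := ts) (p := fun y => y == t)).mem hu)
        · rw [hcne u hut]; exact hv
      · rintro ⟨u, hu, hv⟩
        by_cases hut : u = t
        · subst hut
          rw [hct] at hv
          exact absurd hv hrun
        · refine ⟨u, ?_, by rw [hcne u hut] at hv; exact hv⟩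
          have hmem_ts : u ∈ ts := by
            rcases List.mem_cons.mp hu with rfl | h
            · exact absurd rfl hut
            · exact h
          rw [hdec] at hmem_ts
          rcases List.mem_append.mp hmem_ts with h | h
          · exact absurd (htake u h) hut
          · exact h

-- ===== VERDICT (by name: the statement is the Claim_ definition above) =====
theorem check_suitability_spec : Claim_equal_check_suitability := by
  intro comb problems k _hdom hpre
  unfold Spec_check_suitability check_suitability check_suitability_alt
  simp only []
  rw [pvLoopA_eq _ _ _ _ hpre]
  have hpair : (PySem.List.sorted
      (comb.flatMap (fun idx => ((PySem.Dict.ofList problems).get? idx).getD []))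
      (fun x => x) false).Pairwise (· ≤ ·) := by
    simpa using PySem.List.sorted_pairwise
      (comb.flatMap (fun idx => ((PySem.Dict.ofList problems).get? idx).getD [])) (fun x => x)
  rw [pvGroupScanB_sorted_aux _ _ _ le_rfl hpair]
  have hperm : (PySem.List.sorted
      (comb.flatMap (fun idx => ((PySem.Dict.ofList problems).get? idx).getD []))
      (fun x => x) false).Perm
      (comb.flatMap (fun idx => ((PySem.Dict.ofList problems).get? idx).getD [])) :=
    PySem.List.sorted_perm ..
  congr 1
  apply propext
  constructor
  · rintro ⟨u, hu, hv⟩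
    refine ⟨u, (PySem.List.mem_sorted ..).mpr hu, ?_⟩
    rw [hperm.count_eq]
    simpa [PySem.Dict.getD_empty] using hv
  · rintro ⟨u, hu, hv⟩
    refine ⟨u, (PySem.List.mem_sorted ..).mp hu, ?_⟩
    rw [hperm.count_eq] at hv
    simpa [PySem.Dict.getD_empty] using hv
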